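-- pv_equiv track=rewrite | github.com/FortniteBoxy/comfyui-portable-installer | core/model_downloader.py | _guess_main_file
-- ===== SOURCE A (Python) =====
-- from typing import Optional, Callable, Dict, List, Any
--
-- def _guess_main_file(files: List[str]) -> str:
--     """Guess the main model file from a list of files."""
--     # Prefer safetensors
--     safetensors = [f for f in files if f.endswith(".safetensors")]
--     if safetensors:
--         # Look for common patterns
--         for pattern in ["model", "diffusion", "unet", "vae"]:
--             for f in safetensors:
--                 if pattern in f.lower():
--                     return f.split("/")[-1]
--         return safetensors[0].split("/")[-1]
--
--     # Fall back to ckpt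
--     ckpt = [f for f in files if f.endswith(".ckpt")]
--     if ckpt:
--         return ckpt[0].split("/")[-1]
--
--     return files[0].split("/")[-1] if files else ""
-- ===== SOURCE B (Python) =====
-- def _guess_main_file(files):
--     """Guess the main model file from a list of files."""
--     safetensors = [f for f in files if f.endswith(".safetensors")]
--     if safetensors:
--         patterns = ["model", "diffusion", "unet", "vae"]
--
--         def prio(f):
--             fl = f.lower()
--             for i, p in enumerate(patterns):
--                 if p in fl:
--                     return i
--             return len(patterns)
--
--         # single pass: keep the first file with the smallest priority
--         best = safetensors[0]
--         best_p = prio(best)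
--         for f in safetensors[1:]:
--             p = prio(f)
--             if p < best_p:
--                 best, best_p = f, p
--         return best.split("/")[-1]
--
--     ckpt = [f for f in files if f.endswith(".ckpt")]
--     if ckpt:
--         return ckpt[0].split("/")[-1]
--
--     return files[0].split("/")[-1] if files else ""
-- ===== Notes on version B (the rewrite author's own statement) =====
-- stated objective: alternative
-- what changed: Replaces A's pattern-major nested scan over safetensors with a single file-major pass that keeps the first file with the smallest first-matching-pattern index (priority), leaving the ckpt/files[0] tails unchanged.
import Mathlib
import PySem

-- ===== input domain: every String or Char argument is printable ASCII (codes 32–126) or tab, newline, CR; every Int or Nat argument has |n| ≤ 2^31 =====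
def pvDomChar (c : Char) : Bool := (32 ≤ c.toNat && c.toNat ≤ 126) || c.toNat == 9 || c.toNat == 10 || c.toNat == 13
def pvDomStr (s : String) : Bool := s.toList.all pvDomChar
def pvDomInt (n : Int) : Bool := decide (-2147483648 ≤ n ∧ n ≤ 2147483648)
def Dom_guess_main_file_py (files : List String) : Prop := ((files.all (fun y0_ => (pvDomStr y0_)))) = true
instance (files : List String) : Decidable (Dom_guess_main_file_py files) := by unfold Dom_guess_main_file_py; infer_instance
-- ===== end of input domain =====

-- B replaces A's pattern-major nested scan with a single pass over the files keeping the
-- first file of smallest pattern-priority (objective: alternative decomposition, same cost).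


-- ===== PORT A =====
-- "pattern in f.lower()" (shared by both ports)
def pvMatch (p f : String) : Bool := PySem.Str.isIn p (PySem.Str.lower f)

-- f.split("/")[-1] : split("/") is never empty, so the [-1] index never raises; both getD are unreachable
def pvBase (f : String) : String := (PySem.List.pyGet? ((PySem.Str.split? f "/").getD []) (-1)).getD ""

-- inner loop "for f in safetensors: if pattern in f.lower(): return ..."
def pvInnerA (p : String) : List String → Option String
  | [] => none
  | f :: rest => if pvMatch p f then some f else pvInnerA p rest

-- outer loop "for pattern in [...]"
def pvLoopA : List String → List String → Option String
  | [], _ => none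
  | p :: ps, ss =>
    match pvInnerA p ss with
    | some f => some f
    | none => pvLoopA ps ss

def guess_main_file_py (files : List String) : String :=
  let safetensors := files.filter (fun f => PySem.Str.endswith f ".safetensors")
  match safetensors with
  | a :: rest =>
    match pvLoopA ["model", "diffusion", "unet", "vae"] (a :: rest) with
    | some f => pvBase f
    | none => pvBase a                      -- safetensors[0]
  | [] =>
    let ckpt := files.filter (fun f => PySem.Str.endswith f ".ckpt")
    match ckpt with
    | c :: _ => pvBase c
    | [] =>
      match files with
      | f :: _ => pvBase f
      | [] => ""

-- ===== PORT B =====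
-- prio's "for i, p in enumerate(patterns): ... return len(patterns)"
def pvPrioAux (f : String) : List String → Nat → Nat
  | [], i => i
  | p :: ps, i => if pvMatch p f then i else pvPrioAux f ps (i + 1)

def pvPrio (f : String) : Nat :=
  pvPrioAux f ["model", "diffusion", "unet", "vae"] 0

-- the single pass "for f in safetensors[1:]: ..."
def pvFoldB : List String → String → Nat → String
  | [], best, _ => best
  | f :: rest, best, bp =>
    let p := pvPrio f
    if p < bp then pvFoldB rest f p else pvFoldB rest best bp

def guess_main_file_py_alt (files : List String) : String :=
  let safetensors := files.filter (fun f => PySem.Str.endswith f ".safetensors")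
  match safetensors with
  | a :: rest => pvBase (pvFoldB rest a (pvPrio a))
  | [] =>
    let ckpt := files.filter (fun f => PySem.Str.endswith f ".ckpt")
    match ckpt with
    | c :: _ => pvBase c
    | [] =>
      match files with
      | f :: _ => pvBase f
      | [] => ""

-- ===== PRECONDITION & SPEC =====
def Spec_guess_main_file_py (files : List String) (out : String) : Prop := out = guess_main_file_py_alt files
instance (files : List String) (out : String) : Decidable (Spec_guess_main_file_py files out) := by unfold Spec_guess_main_file_py; infer_instance

-- ===== CLAIM (what is proved, stated in full; the proofs are below) =====
def Claim_equal_guess_main_file_py : Prop := ∀ (files : List String), Dom_guess_main_file_py files → Spec_guess_main_file_py files (guess_main_file_py files)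

-- ===== LEMMAS AND PROOFS =====

theorem pvPrioAux_ge (f : String) (ps : List String) (i : Nat) : i ≤ pvPrioAux f ps i := by
  induction ps generalizing i with
  | nil => exact Nat.le_refl i
  | cons p ps ih =>
    simp only [pvPrioAux]
    split
    · exact Nat.le_refl i
    · exact Nat.le_trans (Nat.le_succ i) (ih (i + 1))

theorem pvInnerA_eq_find? (p : String) (l : List String) :
    pvInnerA p l = l.find? (fun f => pvMatch p f) := by
  induction l with
  | nil => rfl
  | cons f rest ih =>
    simp only [pvInnerA]
    by_cases h : pvMatch p f = true
    · rw [if_pos h, List.find?_cons_of_pos h]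
    · rw [if_neg h, List.find?_cons_of_neg (by simpa using h), ih]

theorem find?_congr_mem {α : Type} (P Q : α → Bool) (l : List α)
    (h : ∀ x ∈ l, P x = Q x) : l.find? P = l.find? Q := by
  induction l with
  | nil => rfl
  | cons a l ih =>
    by_cases hP : P a = true
    · rw [List.find?_cons_of_pos hP, List.find?_cons_of_pos ((h a (by simp)) ▸ hP)]
    · rw [List.find?_cons_of_neg (by simpa using hP),
        List.find?_cons_of_neg (by simp [← h a (by simp)]; simpa using hP)]
      exact ih (fun x hx => h x (by simp [hx]))

theorem pvFoldB_no_improve (l : List String) (b : String) (bp : Nat)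
    (h : ∀ x ∈ l, bp ≤ pvPrio x) : pvFoldB l b bp = b := by
  induction l with
  | nil => rfl
  | cons f rest ih =>
    simp only [pvFoldB]
    rw [if_neg (Nat.not_lt.mpr (h f (by simp)))]
    exact ih (fun x hx => h x (by simp [hx]))

theorem pvFoldB_find (l : List String) (k : Nat) :
    ∀ (b : String) (bp : Nat) (g : String),
    l.find? (fun f => pvPrio f = k) = some g →
    (∀ x ∈ l, k ≤ pvPrio x) → k < bp → pvFoldB l b bp = g := by
  induction l with
  | nil => intro b bp g hfind _ _; simp at hfind
  | cons f rest ih =>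
    intro b bp g hfind hall hk
    by_cases hf : pvPrio f = k
    · rw [List.find?_cons_of_pos (by simpa using hf)] at hfind
      have hg : g = f := (Option.some_inj.mp hfind).symm
      subst hg
      simp only [pvFoldB]
      rw [if_pos (hf ▸ hk)]
      exact pvFoldB_no_improve rest g (pvPrio g)
        (fun x hx => hf ▸ hall x (by simp [hx]))
    · rw [List.find?_cons_of_neg (by simpa using hf)] at hfind
      have hfk : k < pvPrio f :=
        Nat.lt_of_le_of_ne (hall f (by simp)) (fun e => hf e.symm)
      simp only [pvFoldB]
      split
      · exact ih f (pvPrio f) g hfind (fun x hx => hall x (by simp [hx])) hfk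
      · exact ih b bp g hfind (fun x hx => hall x (by simp [hx])) hk

-- the bridge: B's single pass over a::rest computes A's pattern-major scan result
theorem pvBridge (ps : List String) :
    ∀ (i : Nat) (a : String) (rest : List String),
    (∀ f ∈ a :: rest, pvPrio f = pvPrioAux f ps i) →
    pvFoldB rest a (pvPrio a) = (pvLoopA ps (a :: rest)).getD a := by
  induction ps with
  | nil =>
    intro i a rest h
    have ha : pvPrio a = i := h a (by simp)
    simp only [pvLoopA, Option.getD_none]
    exact pvFoldB_no_improve rest a (pvPrio a)
      (fun x hx => by rw [ha, h x (by simp [hx])]; exact Nat.le_refl i)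
  | cons p ps ih =>
    intro i a rest h
    by_cases hex : ∃ f ∈ a :: rest, pvMatch p f = true
    · -- some file matches pattern p: the inner find succeeds
      have hsome : ((a :: rest).find? (fun f => pvMatch p f)).isSome := by
        rw [List.find?_isSome]
        obtain ⟨f, hf, hm⟩ := hex
        exact ⟨f, hf, hm⟩
      obtain ⟨g, hg⟩ := Option.isSome_iff_exists.mp hsome
      have hloop : pvLoopA (p :: ps) (a :: rest) = some g := by
        simp only [pvLoopA, pvInnerA_eq_find?, hg]
      -- on a::rest, pvPrio f = i ↔ p matches f; and pvPrio f ≥ i everywhere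
      have hchar : ∀ f ∈ a :: rest,
          (pvPrio f = i ↔ pvMatch p f = true) ∧ i ≤ pvPrio f := by
        intro f hf
        have hpf := h f hf
        simp only [pvPrioAux] at hpf
        by_cases hc : pvMatch p f = true
        · rw [if_pos hc] at hpf
          exact ⟨⟨fun _ => hc, fun _ => hpf⟩, hpf ▸ Nat.le_refl i⟩
        · rw [if_neg hc] at hpf
          have hge : i + 1 ≤ pvPrio f := hpf ▸ pvPrioAux_ge f ps (i + 1)
          exact ⟨⟨fun e => absurd hge (by omega), fun c => absurd c hc⟩,
            Nat.le_of_succ_le hge⟩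
      have hfind2 : (a :: rest).find? (fun f => pvPrio f = i) = some g := by
        rw [find?_congr_mem (fun f => decide (pvPrio f = i)) (fun f => pvMatch p f)
            (a :: rest)
            (fun x hx => by
              by_cases hc : pvMatch p x = true
              · simp [hc, (hchar x hx).1.mpr hc]
              · have : ¬ pvPrio x = i := fun e => absurd ((hchar x hx).1.mp e) hc
                simp [this, Bool.eq_false_iff.mpr hc])]
        exact hg
      rw [hloop, Option.getD_some]
      by_cases ha : pvPrio a = i
      · -- the head already matches p: it is the first match, and the fold keeps it
        rw [List.find?_cons_of_pos (by simpa using ha)] at hfind2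
        have hga : g = a := (Option.some_inj.mp hfind2).symm
        subst hga
        exact pvFoldB_no_improve rest g (pvPrio g)
          (fun x hx => ha ▸ (hchar x (by simp [hx])).2)
      · have hgt : i < pvPrio a :=
          Nat.lt_of_le_of_ne (hchar a (by simp)).2 (fun e => ha e.symm)
        rw [List.find?_cons_of_neg (by simpa using ha)] at hfind2
        exact pvFoldB_find rest i a (pvPrio a) g hfind2
          (fun x hx => (hchar x (by simp [hx])).2) hgt
    · -- no file matches p: both sides fall through to the remaining patterns
      push Not at hex
      have hnone : pvInnerA p (a :: rest) = none := by
        rw [pvInnerA_eq_find?, List.find?_eq_none]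
        exact fun x hx => by simpa using hex x hx
      have hstep : pvLoopA (p :: ps) (a :: rest) = pvLoopA ps (a :: rest) := by
        simp only [pvLoopA, hnone]
      rw [hstep]
      exact ih (i + 1) a rest (fun f hf => by
        have hpf := h f hf
        simp only [pvPrioAux] at hpf
        rwa [if_neg (by simpa using hex f hf)] at hpf)

-- ===== VERDICT (by name: the statement is the Claim_ definition above) =====
theorem guess_main_file_py_spec : Claim_equal_guess_main_file_py := by
  intro files _
  unfold Spec_guess_main_file_py guess_main_file_py guess_main_file_py_alt
  cases h : files.filter (fun f => PySem.Str.endswith f ".safetensors") with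
  | nil => rfl
  | cons a rest =>
    have hB := pvBridge ["model", "diffusion", "unet", "vae"] 0 a rest
      (fun f _ => rfl)
    simp only [hB]
    cases pvLoopA ["model", "diffusion", "unet", "vae"] (a :: rest) with
    | none => rfl
    | some g => rfl
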